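-- pv_equiv track=rewrite | github.com/Astrocytech/Glyphser | tooling/security/strict_lane_fail_closed_control_gate.py | _step_blocks
-- ===== SOURCE A (Python) =====
-- def _step_blocks(text: str) -> list[tuple[int, list[str]]]:
--     blocks: list[tuple[int, list[str]]] = []
--     current: list[str] = []
--     start_line = 1
--     for line_no, line in enumerate(text.splitlines(), start=1):
--         if line.lstrip().startswith("- name:"):
--             if current:
--                 blocks.append((start_line, current))
--             current = [line]
--             start_line = line_no
--             continue
--         if current:
--             current.append(line)
--     if current:
--         blocks.append((start_line, current))
--     return blocks
-- ===== SOURCE B (Python) =====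
-- def _next_header(lines, i):
--     while i < len(lines) and not lines[i].lstrip().startswith("- name:"):
--         i += 1
--     return i
--
--
-- def _step_blocks(text: str) -> list[tuple[int, list[str]]]:
--     lines = text.splitlines()
--     blocks: list[tuple[int, list[str]]] = []
--     i = _next_header(lines, 0)
--     while i < len(lines):
--         j = _next_header(lines, i + 1)
--         blocks.append((i + 1, lines[i:j]))
--         i = j
--     return blocks
-- ===== Notes on version B (the rewrite author's own statement) =====
-- stated objective: alternative
-- what changed: Replaces A's single pass with running (blocks, current, start_line) accumulator state by an index-then-slice decomposition: a _next_header scan locates each header position and each block is the slice of the lines list from one header to the next.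
import Mathlib
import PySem

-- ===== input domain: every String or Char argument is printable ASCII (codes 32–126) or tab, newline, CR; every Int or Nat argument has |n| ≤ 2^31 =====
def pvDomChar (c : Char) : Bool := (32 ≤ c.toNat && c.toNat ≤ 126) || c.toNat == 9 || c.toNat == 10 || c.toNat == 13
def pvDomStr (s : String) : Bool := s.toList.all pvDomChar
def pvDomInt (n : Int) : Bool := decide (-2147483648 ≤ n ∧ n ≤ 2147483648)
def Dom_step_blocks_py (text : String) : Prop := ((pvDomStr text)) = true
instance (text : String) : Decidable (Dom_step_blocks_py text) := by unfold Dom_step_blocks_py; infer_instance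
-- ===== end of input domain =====

-- B groups the lines by locating each '- name:' header with an index scan and slicing
-- from one header to the next, instead of A's running (blocks, current, start_line) accumulator.

-- ===== PORT A =====
-- is this line a '- name:' header?  (line.lstrip().startswith("- name:"))
def pvIsHeader (line : String) : Bool :=
  PySem.Str.startswith (PySem.Str.lstrip line) "- name:"

-- the for-loop of A over enumerate(lines, start=1), state (blocks, current, start_line)
def pvGoA (rows : List (Int × String)) (blocks : List (Int × List String))
    (current : List String) (start : Int) : List (Int × List String) :=
  match rows with
  | [] => if current.isEmpty then blocks else blocks ++ [(start, current)]
  | (no, line) :: rest =>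
    if pvIsHeader line then
      pvGoA rest (if current.isEmpty then blocks else blocks ++ [(start, current)]) [line] no
    else
      pvGoA rest blocks (if current.isEmpty then current else current ++ [line]) start

def step_blocks_py (text : String) : List (Int × List String) :=
  pvGoA (PySem.List.enumerate (PySem.Str.splitlines text) 1) [] [] 1

-- ===== PORT B =====
-- _next_header: first index k ≥ i with a header line (len(lines) if none)
def pvNextHeader (lines : List String) (i : Nat) : Nat :=
  if h : i < lines.length then
    if pvIsHeader lines[i] then i else pvNextHeader lines (i + 1)
  else i
termination_by lines.length - i

theorem pvNextHeader_ge (lines : List String) (k : Nat) : pvNextHeader lines k ≥ k := by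
  induction k using pvNextHeader.induct lines with
  | case1 i h hh => rw [pvNextHeader]; simp [h, hh]
  | case2 i h hh ih => rw [pvNextHeader]; simp [h, hh]; omega
  | case3 i h => rw [pvNextHeader]; simp [h]

-- the main while-loop of B; lines[i:j] is exact as (drop i).take (j - i) since 0 ≤ i ≤ j
def pvLoopB (lines : List String) (blocks : List (Int × List String)) (i : Nat) :
    List (Int × List String) :=
  if h : i < lines.length then
    let j := pvNextHeader lines (i + 1)
    pvLoopB lines (blocks ++ [(((i : Int) + 1), ((lines.drop i).take (j - i)))]) j
  else blocks
termination_by lines.length - i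
decreasing_by have := pvNextHeader_ge lines (i + 1); omega

def step_blocks_py_alt (text : String) : List (Int × List String) :=
  let lines := PySem.Str.splitlines text
  pvLoopB lines [] (pvNextHeader lines 0)

-- ===== PRECONDITION & SPEC =====
def Spec_step_blocks_py (text : String) (out : List (Int × List String)) : Prop := out = step_blocks_py_alt text
instance (text : String) (out : List (Int × List String)) : Decidable (Spec_step_blocks_py text out) := by unfold Spec_step_blocks_py; infer_instance

-- ===== CLAIM (what is proved, stated in full; the proofs are below) =====
def Claim_equal_step_blocks_py : Prop := ∀ (text : String), Dom_step_blocks_py text → Spec_step_blocks_py text (step_blocks_py text)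

-- ===== LEMMAS AND PROOFS =====

def pvNotHeader (l : String) : Bool := ! pvIsHeader l

-- canonical chunking of a suffix whose head (if any) is a header line
def pvChunks : List String → Int → List (Int × List String)
  | [], _ => []
  | a :: rest, n =>
    (n, a :: rest.takeWhile pvNotHeader) ::
      pvChunks (rest.dropWhile pvNotHeader)
        (n + 1 + (rest.takeWhile pvNotHeader).length)
termination_by l => l.length
decreasing_by
  have := List.length_dropWhile_le pvNotHeader rest
  simp; omega

theorem pvChunks_nil (n : Int) : pvChunks [] n = [] := by rw [pvChunks]

theorem pvChunks_cons (a : String) (rest : List String) (n : Int) :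
    pvChunks (a :: rest) n =
      (n, a :: rest.takeWhile pvNotHeader) ::
        pvChunks (rest.dropWhile pvNotHeader)
          (n + 1 + (rest.takeWhile pvNotHeader).length) := by rw [pvChunks]

theorem pvChunks_congr (l : List String) {a b : Int} (h : a = b) :
    pvChunks l a = pvChunks l b := by rw [h]

theorem pvGoA_open (lines : List String) (k : Int) (blocks : List (Int × List String))
    (current : List String) (start : Int) (hc : ¬ current.isEmpty) :
    pvGoA (PySem.List.enumerate lines k) blocks current start =
      blocks ++ (start, current ++ lines.takeWhile pvNotHeader) ::
        pvChunks (lines.dropWhile pvNotHeader)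
          (k + (lines.takeWhile pvNotHeader).length) := by
  induction lines generalizing k blocks current start with
  | nil => simp [pvGoA, PySem.List.enumerate_nil, hc, pvChunks_nil]
  | cons l rest ih =>
    rw [PySem.List.enumerate_cons]
    by_cases hl : pvIsHeader l
    · have hnl : pvNotHeader l = false := by simp [pvNotHeader, hl]
      simp only [pvGoA, hl, if_true, hc, if_neg]
      rw [ih (k + 1) _ [l] k (by simp)]
      simp [List.takeWhile_cons, List.dropWhile_cons, hnl, pvChunks_cons]
    · have hnl : pvNotHeader l = true := by simp [pvNotHeader, hl]
      simp only [pvGoA, hl, if_false, if_neg hc]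
      rw [ih (k + 1) blocks (current ++ [l]) start (by simp)]
      simp [List.takeWhile_cons, List.dropWhile_cons, hnl]
      exact pvChunks_congr _ (by push_cast; ring)

theorem pvGoA_closed (lines : List String) (k : Int) (blocks : List (Int × List String))
    (start : Int) :
    pvGoA (PySem.List.enumerate lines k) blocks [] start =
      blocks ++ pvChunks (lines.dropWhile pvNotHeader)
        (k + (lines.takeWhile pvNotHeader).length) := by
  induction lines generalizing k blocks start with
  | nil => simp [pvGoA, PySem.List.enumerate_nil, pvChunks_nil]
  | cons l rest ih =>
    rw [PySem.List.enumerate_cons]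
    by_cases hl : pvIsHeader l
    · have hnl : pvNotHeader l = false := by simp [pvNotHeader, hl]
      simp only [pvGoA, hl, if_true, List.isEmpty_nil]
      rw [pvGoA_open rest (k + 1) blocks [l] k (by simp)]
      simp [List.takeWhile_cons, List.dropWhile_cons, hnl, pvChunks_cons]
    · have hnl : pvNotHeader l = true := by simp [pvNotHeader, hl]
      simp only [pvGoA, hl, if_false, List.isEmpty_nil, if_true]
      rw [ih (k + 1) blocks start]
      simp [List.takeWhile_cons, List.dropWhile_cons, hnl]
      exact pvChunks_congr _ (by push_cast; ring)

-- pvNextHeader computed via takeWhile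
theorem pvNextHeader_eq (lines : List String) (i : Nat) :
    pvNextHeader lines i = i + ((lines.drop i).takeWhile pvNotHeader).length := by
  induction i using pvNextHeader.induct lines with
  | case1 i h hh =>
    rw [pvNextHeader]
    rw [List.drop_eq_getElem_cons h]
    have : pvNotHeader lines[i] = false := by simp [pvNotHeader, hh]
    simp [h, hh, List.takeWhile_cons, this]
  | case2 i h hh ih =>
    rw [pvNextHeader]
    simp only [h, dif_pos, hh, if_false]
    rw [ih, List.drop_eq_getElem_cons h, List.takeWhile_cons]
    have hx : pvNotHeader lines[i] = true := by simp [pvNotHeader, hh]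
    simp [hx]
    omega
  | case3 i h =>
    rw [pvNextHeader]
    simp at h
    simp [List.drop_eq_nil_of_le h, h]

theorem take_takeWhile_length {α : Type} (p : α → Bool) (l : List α) :
    l.take (l.takeWhile p).length = l.takeWhile p := by
  induction l with
  | nil => simp
  | cons a r ih =>
    by_cases hp : p a <;> simp [List.takeWhile_cons, hp, ih]

theorem drop_takeWhile_length {α : Type} (p : α → Bool) (l : List α) :
    l.drop (l.takeWhile p).length = l.dropWhile p := by
  induction l with
  | nil => simp
  | cons a r ih =>
    by_cases hp : p a <;> simp [List.takeWhile_cons, List.dropWhile_cons, hp, ih]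

theorem takeWhile_dropWhile_nil {α : Type} (p : α → Bool) (l : List α) :
    (l.dropWhile p).takeWhile p = [] := by
  induction l with
  | nil => simp
  | cons a r ih =>
    by_cases hp : p a <;> simp [List.dropWhile_cons, List.takeWhile_cons, hp, ih]

theorem pvLoopB_eq (lines : List String)
    (i : Nat) (blocks : List (Int × List String))
    (hi : ((lines.drop i).takeWhile pvNotHeader) = []) :
    pvLoopB lines blocks i = blocks ++ pvChunks (lines.drop i) ((i : Int) + 1) := by
  induction hn : lines.length - i using Nat.strong_induction_on generalizing i blocks with
  | _ n ih =>
  rw [pvLoopB]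
  by_cases h : i < lines.length
  · simp only [h, dif_pos]
    have hdrop : lines.drop i = lines[i] :: lines.drop (i + 1) := List.drop_eq_getElem_cons h
    set T := (lines.drop (i + 1)).takeWhile pvNotHeader with hT
    have hj : pvNextHeader lines (i + 1) = i + 1 + T.length := pvNextHeader_eq lines (i + 1)
    have hhead : pvNotHeader lines[i] = false := by
      rw [hdrop] at hi
      by_cases hx : pvNotHeader lines[i]
      · rw [List.takeWhile_cons, hx] at hi; simp at hi
      · simpa using hx
    have hslice : (lines.drop i).take (pvNextHeader lines (i + 1) - i) = lines[i] :: T := by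
      rw [hj, hdrop]
      have h2 : i + 1 + T.length - i = T.length + 1 := by omega
      rw [h2, List.take_succ_cons, hT, take_takeWhile_length]
    have hrest : lines.drop (pvNextHeader lines (i + 1)) =
        (lines.drop (i + 1)).dropWhile pvNotHeader := by
      rw [hj, ← List.drop_drop, hT, drop_takeWhile_length]
    have hfits : ((lines.drop (pvNextHeader lines (i + 1))).takeWhile pvNotHeader) = [] := by
      rw [hrest]; exact takeWhile_dropWhile_nil _ _
    have hlt : lines.length - pvNextHeader lines (i + 1) < n := by
      have := pvNextHeader_ge lines (i + 1); omega
    rw [ih _ hlt _ _ hfits rfl, hslice, hrest, hdrop, pvChunks_cons, ← hT]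
    simp [hj]
    exact pvChunks_congr _ (by push_cast; ring)
  · simp only [h, dif_neg]
    have hle : lines.length ≤ i := by omega
    rw [List.drop_eq_nil_of_le hle, pvChunks_nil]
    simp

-- ===== VERDICT (by name: the statement is the Claim_ definition above) =====
theorem step_blocks_py_spec : Claim_equal_step_blocks_py := by
  intro text _
  unfold Spec_step_blocks_py step_blocks_py step_blocks_py_alt
  set lines := PySem.Str.splitlines text with hl
  rw [pvGoA_closed lines 1 [] 1]
  rw [pvLoopB_eq lines (pvNextHeader lines 0) []
      (by rw [pvNextHeader_eq]; simp [drop_takeWhile_length, takeWhile_dropWhile_nil])]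
  rw [pvNextHeader_eq lines 0]
  simp [drop_takeWhile_length]
  exact pvChunks_congr _ (by push_cast; ring)
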